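-- pv_equiv track=rewrite | github.com/ibopeng/NaiveBayes_TAN | bayes_func.py | split_instanceset_on_label
-- ===== SOURCE A (Python) =====
-- def split_instanceset_on_label(instance_data, label_range):
--     """
--     Split original dataset based on different class labels
--     :param instance_data:
--     :param label_range:
--     :return:
--     """
--
--     instanceset_split = []
--     for lb in label_range:
--         # extract instances with class value == lb
--         instance_with_lb = []
--         for ins in instance_data:
--             if ins[-1] == lb:
--                 instance_with_lb.append(ins)
--
--         instanceset_split.append(instance_with_lb)
--
--     return instanceset_split
-- ===== SOURCE B (Python) =====
-- def split_instanceset_on_label(instance_data, label_range):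
--     buckets = {lb: [] for lb in label_range}
--     for ins in instance_data:
--         lab = ins[-1]
--         if lab in buckets:
--             buckets[lab].append(ins)
--     return [buckets[lb] for lb in label_range]
-- ===== Notes on version B (the rewrite author's own statement) =====
-- stated objective: alternative
-- what changed: Replaced A's per-label rescan of the whole dataset with a staged algorithm: pre-initialise one empty bucket per label, make a single membership-guarded pass over the instances appending each to its label's bucket, then read the buckets off in label_range order.
-- outside the precondition, e.g. on split_instanceset_on_label([[]], []): A returns [], B raises IndexError
import Mathlib
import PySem

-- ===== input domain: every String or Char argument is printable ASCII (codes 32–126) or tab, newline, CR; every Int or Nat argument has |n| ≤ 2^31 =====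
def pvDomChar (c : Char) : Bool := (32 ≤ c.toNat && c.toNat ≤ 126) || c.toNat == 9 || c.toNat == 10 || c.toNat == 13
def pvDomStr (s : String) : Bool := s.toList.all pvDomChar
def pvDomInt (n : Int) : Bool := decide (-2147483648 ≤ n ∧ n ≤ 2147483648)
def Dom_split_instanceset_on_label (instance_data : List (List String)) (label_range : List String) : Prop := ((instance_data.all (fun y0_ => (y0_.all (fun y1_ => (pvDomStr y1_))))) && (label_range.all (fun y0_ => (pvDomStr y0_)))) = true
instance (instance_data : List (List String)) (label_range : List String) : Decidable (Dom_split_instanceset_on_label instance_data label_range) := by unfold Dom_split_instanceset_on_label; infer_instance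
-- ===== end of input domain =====

-- B replaces A's per-label rescan of the whole dataset with a staged algorithm:
-- pre-initialise one empty bucket per label, a single membership-guarded pass over
-- the instances filling the buckets, then read them off in label_range order
-- (objective: alternative algorithm; return values proved equal on Pre_).

-- ===== PORT A =====
-- literal port of A: outer loop over label_range, inner loop rescans instance_data
def split_instanceset_on_label (instance_data : List (List String)) (label_range : List String) : List (List (List String)) :=
  label_range.foldl (fun instanceset_split lb =>
    let instance_with_lb := instance_data.foldl (fun acc ins =>
      match PySem.List.pyGet? ins (-1) with          -- ins[-1]; none = IndexError, excluded by Pre_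
      | some x => if x = lb then acc ++ [ins] else acc
      | none => acc) []
    instanceset_split ++ [instance_with_lb]) []

-- ===== PORT B =====
-- literal port of Source B: init buckets, one guarded filling pass, then direct reads
def split_instanceset_on_label_alt (instance_data : List (List String)) (label_range : List String) : List (List (List String)) :=
  let buckets0 := label_range.foldl (fun d lb => d.insert lb ([] : List (List String))) PySem.Dict.empty  -- {lb: [] for lb in label_range}
  let buckets := instance_data.foldl (fun d ins =>
    match PySem.List.pyGet? ins (-1) with            -- lab = ins[-1]; none = IndexError, excluded by Pre_
    | some lab => if d.contains lab then d.modify lab [] (fun b => b ++ [ins]) else d  -- if lab in buckets: buckets[lab].append(ins)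
    | none => d) buckets0
  label_range.map (fun lb => buckets.getD lb [])     -- buckets[lb]; key always present (lb ∈ label_range), so getD is exact

-- ===== PRECONDITION & SPEC =====
-- Pre_ excludes datasets containing an empty row: there ins[-1] raises IndexError in B
-- always and in A whenever label_range is nonempty (A returns [] when label_range is
-- empty without touching the rows, a value B cannot match since it scans the rows first).
def Pre_split_instanceset_on_label (instance_data : List (List String)) (label_range : List String) : Prop :=
  ∀ ins ∈ instance_data, ins ≠ []
instance (instance_data : List (List String)) (label_range : List String) : Decidable (Pre_split_instanceset_on_label instance_data label_range) := by unfold Pre_split_instanceset_on_label; infer_instance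
def pvWitness_split_instanceset_on_label : List (List String) × List String :=
  ([["a", "yes"], ["b", "no"]], ["yes", "no"])

def Spec_split_instanceset_on_label (instance_data : List (List String)) (label_range : List String) (out : List (List (List String))) : Prop := out = split_instanceset_on_label_alt instance_data label_range
instance (instance_data : List (List String)) (label_range : List String) (out : List (List (List String))) : Decidable (Spec_split_instanceset_on_label instance_data label_range out) := by unfold Spec_split_instanceset_on_label; infer_instance

-- ===== CLAIM (what is proved, stated in full; the proofs are below) =====
def Claim_equal_split_instanceset_on_label : Prop := ∀ (instance_data : List (List String)) (label_range : List String), Dom_split_instanceset_on_label instance_data label_range → Pre_split_instanceset_on_label instance_data label_range → Spec_split_instanceset_on_label instance_data label_range (split_instanceset_on_label instance_data label_range)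

-- ===== LEMMAS AND PROOFS =====

-- A's inner loop as a structural recursion (selected instances for one label)
def pvSel (lb : String) : List (List String) → List (List String)
  | [] => []
  | ins :: t =>
    (match PySem.List.pyGet? ins (-1) with
     | some x => if x = lb then [ins] else []
     | none => []) ++ pvSel lb t

lemma pvSel_foldl (lb : String) (l : List (List String)) (acc : List (List String)) :
    l.foldl (fun acc ins =>
      match PySem.List.pyGet? ins (-1) with
      | some x => if x = lb then acc ++ [ins] else acc
      | none => acc) acc = acc ++ pvSel lb l := by
  induction l generalizing acc with
  | nil => simp [pvSel]
  | cons ins t ih =>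
    simp only [List.foldl_cons, pvSel]
    cases h : PySem.List.pyGet? ins (-1) with
    | none => simp [ih]
    | some x =>
      by_cases hx : x = lb <;> simp [hx, ih]

-- A's outer loop builds the per-label selections in order
lemma pvOuter (instance_data : List (List String)) (lr : List String)
    (acc : List (List (List String))) :
    lr.foldl (fun instanceset_split lb =>
      let instance_with_lb := instance_data.foldl (fun acc ins =>
        match PySem.List.pyGet? ins (-1) with
        | some x => if x = lb then acc ++ [ins] else acc
        | none => acc) []
      instanceset_split ++ [instance_with_lb]) acc
      = acc ++ lr.map (fun lb => pvSel lb instance_data) := by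
  induction lr generalizing acc with
  | nil => simp
  | cons lb t ih =>
    simp only [List.foldl_cons]
    rw [ih, pvSel_foldl]
    simp

-- B's init pass: every bucket starts empty
lemma pvInit_getD (lr : List String) (d : PySem.Dict String (List (List String))) (lb : String)
    (hd : d.getD lb [] = []) :
    (lr.foldl (fun d lb => d.insert lb ([] : List (List String))) d).getD lb [] = [] := by
  induction lr generalizing d with
  | nil => exact hd
  | cons x t ih =>
    simp only [List.foldl_cons]
    apply ih
    rw [PySem.Dict.getD_insert]
    split <;> simp [hd]

-- B's init pass: exactly the labels of label_range are keys
lemma pvInit_contains (lr : List String) (d : PySem.Dict String (List (List String))) (lb : String) :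
    (lr.foldl (fun d lb => d.insert lb ([] : List (List String))) d).contains lb
      = (d.contains lb || decide (lb ∈ lr)) := by
  induction lr generalizing d with
  | nil => simp
  | cons x t ih =>
    simp only [List.foldl_cons]
    rw [ih, PySem.Dict.contains_insert]
    by_cases hx : lb = x <;> simp [hx]
    · cases h : PySem.Dict.contains d lb <;> simp
      exact fun hEq => absurd hEq hx

-- B's filling pass: a present key's bucket collects exactly A's selection, in order
lemma pvFill_getD (l : List (List String)) (d : PySem.Dict String (List (List String)))
    (lb : String) (hc : d.contains lb = true) :
    (l.foldl (fun d ins =>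
      match PySem.List.pyGet? ins (-1) with
      | some lab => if d.contains lab then d.modify lab [] (fun b => b ++ [ins]) else d
      | none => d) d).getD lb [] = d.getD lb [] ++ pvSel lb l := by
  induction l generalizing d with
  | nil => simp [pvSel]
  | cons ins t ih =>
    simp only [List.foldl_cons, pvSel]
    cases h : PySem.List.pyGet? ins (-1) with
    | none => simp [ih d hc]
    | some lab =>
      by_cases hin : d.contains lab = true
      · simp only [hin, if_true]
        have hc' : (d.modify lab [] (fun b => b ++ [ins])).contains lb = true := by
          rw [PySem.Dict.contains_modify]
          by_cases hlb : lb = lab <;> simp [hlb, hc]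
        rw [ih _ hc', PySem.Dict.getD_modify]
        by_cases hlb : lb = lab
        · simp [hlb]
        · simp [hlb]
          exact fun hEq => hlb hEq.symm
      · have hne : lab ≠ lb := fun hEq => hin (hEq ▸ hc)
        simp only [hin, if_neg, Bool.false_eq_true, not_false_eq_true, hne]
        simp [ih d hc]

-- ===== VERDICT (by name: the statement is the Claim_ definition above) =====
theorem split_instanceset_on_label_spec : Claim_equal_split_instanceset_on_label := by
  intro instance_data label_range _hdom _hpre
  unfold Spec_split_instanceset_on_label split_instanceset_on_label split_instanceset_on_label_alt
  rw [pvOuter]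
  simp only [List.nil_append]
  apply List.map_congr_left
  intro lb hlb
  have hc : (label_range.foldl (fun d lb => d.insert lb ([] : List (List String)))
      PySem.Dict.empty).contains lb = true := by
    rw [pvInit_contains]; simp [hlb]
  rw [pvFill_getD _ _ _ hc, pvInit_getD _ _ _ (by simp)]
  simp
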